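-- pv_equiv track=rewrite | github.com/vivsvaan/Compiler_Design_Lab | 2. DFA - Deterministic Finite Automata/dfa.py | makeTransition
-- ===== SOURCE A (Python) =====
-- def makeTransition(strcmp, values, key, j, transitionStates):
--     if(strcmp[:3] == 'eps'):
--         strcmp = strcmp[3:]
--     index = 0
--     while strcmp:
--         if(strcmp in values):
--             index = values.index(strcmp)
--             return index
--         strcmp = strcmp[1:]
--     return index
-- ===== SOURCE B (Python) =====
-- def makeTransition(strcmp, values, key, j, transitionStates):
--     if strcmp[:3] == 'eps':
--         strcmp = strcmp[3:]
--     best = None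
--     for v in values:
--         if v and strcmp.endswith(v) and (best is None or len(v) > len(best)):
--             best = v
--     if best is None:
--         return 0
--     return values.index(best)
-- ===== Notes on version B (the rewrite author's own statement) =====
-- stated objective: faster
-- what changed: Instead of repeatedly chopping the first character off strcmp and re-scanning values for each suffix (quadratic in the string length), B makes one pass over values keeping the longest non-empty v with strcmp.endswith(v), then returns its index (0 when none matches).
import Mathlib
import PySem

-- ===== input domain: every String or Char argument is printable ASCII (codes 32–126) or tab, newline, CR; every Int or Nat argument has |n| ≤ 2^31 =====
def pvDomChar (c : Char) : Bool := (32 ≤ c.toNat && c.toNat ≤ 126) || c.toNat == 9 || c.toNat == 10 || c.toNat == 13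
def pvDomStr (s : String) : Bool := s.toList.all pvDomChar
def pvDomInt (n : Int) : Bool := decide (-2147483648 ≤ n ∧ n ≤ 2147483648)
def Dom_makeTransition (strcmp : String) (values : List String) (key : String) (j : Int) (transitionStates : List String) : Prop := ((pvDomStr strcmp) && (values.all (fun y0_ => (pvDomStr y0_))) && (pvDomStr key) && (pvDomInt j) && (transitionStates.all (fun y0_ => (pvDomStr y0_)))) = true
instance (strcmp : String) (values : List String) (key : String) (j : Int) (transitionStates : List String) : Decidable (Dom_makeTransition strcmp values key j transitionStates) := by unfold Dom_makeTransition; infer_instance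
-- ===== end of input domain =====

-- ===== PORT A =====
-- B re-implements the suffix search as a single scan of `values`; same return value, no side effects.
-- A's while-loop: drop the first character until strcmp is in values (return its index) or empty (return 0).
def mtLoopA (values : List String) (s : List Char) : Int :=
  match s with
  | [] => 0
  | _ :: rest =>
    if values.contains (String.ofList s) then
      ((PySem.List.index? values (String.ofList s)).getD 0 : Int)
    else
      mtLoopA values rest

def makeTransition (strcmp : String) (values : List String) (key : String) (j : Int) (transitionStates : List String) : Int :=
  let s := if PySem.Str.slice strcmp none (some 3) == "eps" then PySem.Str.slice strcmp (some 3) none else strcmp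
  mtLoopA values s.toList

-- ===== PORT B =====
-- B's for-loop: keep the longest non-empty v in values with strcmp.endswith(v).
def mtStepB (s : String) (best : Option String) (v : String) : Option String :=
  if (!(v == "")) && PySem.Str.endswith s v &&
     (match best with
      | none => true
      | some b => decide (b.toList.length < v.toList.length)) then
    some v
  else
    best

def makeTransition_alt (strcmp : String) (values : List String) (key : String) (j : Int) (transitionStates : List String) : Int :=
  let s := if PySem.Str.slice strcmp none (some 3) == "eps" then PySem.Str.slice strcmp (some 3) none else strcmp
  match values.foldl (mtStepB s) none with
  | none => 0
  | some b => ((PySem.List.index? values b).getD 0 : Int)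

-- ===== PRECONDITION & SPEC =====
def Spec_makeTransition (strcmp : String) (values : List String) (key : String) (j : Int) (transitionStates : List String) (out : Int) : Prop := out = makeTransition_alt strcmp values key j transitionStates
instance (strcmp : String) (values : List String) (key : String) (j : Int) (transitionStates : List String) (out : Int) : Decidable (Spec_makeTransition strcmp values key j transitionStates out) := by unfold Spec_makeTransition; infer_instance

-- ===== CLAIM (what is proved, stated in full; the proofs are below) =====
def Claim_equal_makeTransition : Prop := ∀ (strcmp : String) (values : List String) (key : String) (j : Int) (transitionStates : List String), Dom_makeTransition strcmp values key j transitionStates → Spec_makeTransition strcmp values key j transitionStates (makeTransition strcmp values key j transitionStates)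

-- ===== LEMMAS AND PROOFS =====

-- If the Bool condition of mtStepB fires, v is a non-empty suffix of s; otherwise the accumulator is kept.
theorem stepB_cases (s : String) (acc : Option String) (v : String) :
    mtStepB s acc v = acc ∨ (mtStepB s acc v = some v ∧ v ≠ "" ∧ v.toList <:+ s.toList) := by
  unfold mtStepB
  split_ifs with h
  · right
    refine ⟨rfl, ?_, ?_⟩
    · intro hv; simp [hv] at h
    · simp only [Bool.and_eq_true] at h
      exact (PySem.Chars.endswith_iff _ _).1 (by simpa using h.1.2)
  · left; rfl

theorem stepB_some (s a v : String) :
    mtStepB s (some a) v = some a ∨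
      (mtStepB s (some a) v = some v ∧ a.toList.length < v.toList.length) := by
  unfold mtStepB
  split_ifs with h
  · right
    refine ⟨rfl, ?_⟩
    simp only [Bool.and_eq_true] at h
    simpa using h.2
  · left; rfl

theorem stepB_empty (acc : Option String) (v : String) : mtStepB "" acc v = acc := by
  unfold mtStepB
  split_ifs with h
  · exfalso
    simp only [Bool.and_eq_true] at h
    have hne := h.1.1
    have hsuf : v.toList <:+ ("" : String).toList :=
      (PySem.Chars.endswith_iff _ _).1 (by simpa using h.1.2)
    have hv : v = "" := by simpa using hsuf
    simp [hv] at hne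
  · rfl

theorem foldB_empty (values : List String) (acc : Option String) :
    List.foldl (mtStepB "") acc values = acc := by
  induction values generalizing acc with
  | nil => rfl
  | cons v vs ih => simpa [stepB_empty] using ih acc

-- The fold's result is its initial accumulator or some non-empty suffix of s drawn from values.
theorem foldB_shape (s : String) (values : List String) (acc : Option String) :
    List.foldl (mtStepB s) acc values = acc ∨
      ∃ v ∈ values, List.foldl (mtStepB s) acc values = some v ∧ v ≠ "" ∧ v.toList <:+ s.toList := by
  induction values generalizing acc with
  | nil => left; rfl
  | cons w ws ih =>
    rcases ih (mtStepB s acc w) with h | ⟨v, hv, hr, hp⟩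
    · rcases stepB_cases s acc w with h0 | ⟨h0, hp⟩
      · left; simpa [h0] using h
      · right; exact ⟨w, by simp, by simpa [h0] using h, hp⟩
    · right; exact ⟨v, by simp [hv], hr, hp⟩

-- Starting from some a, the fold returns some b at least as long as a.
theorem foldB_mono (s : String) (values : List String) (a : String) :
    ∃ b, List.foldl (mtStepB s) (some a) values = some b ∧ a.toList.length ≤ b.toList.length := by
  induction values generalizing a with
  | nil => exact ⟨a, rfl, le_rfl⟩
  | cons w ws ih =>
    rcases stepB_some s a w with h | ⟨h, hlt⟩
    · rcases ih a with ⟨b, hb, hlen⟩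
      exact ⟨b, by simpa [h] using hb, hlen⟩
    · rcases ih w with ⟨b, hb, hlen⟩
      exact ⟨b, by simpa [h] using hb, le_trans (le_of_lt hlt) hlen⟩

-- Every non-empty suffix of s occurring in values is dominated in length by the fold's result.
theorem foldB_dom (s : String) (values : List String) (acc : Option String) (v : String)
    (hmem : v ∈ values) (hne : v ≠ "") (hsuf : v.toList <:+ s.toList) :
    ∃ b, List.foldl (mtStepB s) acc values = some b ∧ v.toList.length ≤ b.toList.length := by
  induction values generalizing acc with
  | nil => cases hmem
  | cons w ws ih =>
    rcases List.mem_cons.1 hmem with rfl | hmem'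
    · have hend : PySem.Chars.endswith s.toList v.toList = true := by
        rw [PySem.Chars.endswith_iff]; exact hsuf
      have hvB : (v == "") = false := by simpa using hne
      have hstep : ∃ c, mtStepB s acc v = some c ∧ v.toList.length ≤ c.toList.length := by
        cases acc with
        | none => exact ⟨v, by simp [mtStepB, hend, hvB], le_rfl⟩
        | some a =>
          by_cases hlt : a.length < v.length
          · exact ⟨v, by simp [mtStepB, hend, hvB, hlt], le_rfl⟩
          · exact ⟨a, by simp [mtStepB, hend, hvB, hlt], by
              simpa using le_of_not_gt hlt⟩
      rcases hstep with ⟨c, hc, hlen⟩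
      rcases foldB_mono s ws c with ⟨b, hb, hlen'⟩
      exact ⟨b, by simpa [List.foldl_cons, hc] using hb, le_trans hlen hlen'⟩
    · exact ih (mtStepB s acc w) hmem'

-- Dropping the head character changes nothing when the full string is not in values.
theorem stepB_tail (c : Char) (rest : List Char) (values : List String)
    (hmem : String.ofList (c :: rest) ∉ values) (acc : Option String) (v : String)
    (hv : v ∈ values) :
    mtStepB (String.ofList (c :: rest)) acc v = mtStepB (String.ofList rest) acc v := by
  have hends : PySem.Str.endswith (String.ofList (c :: rest)) v
      = PySem.Str.endswith (String.ofList rest) v := by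
    by_cases hsuf : v.toList <:+ rest
    · have h1 : PySem.Str.endswith (String.ofList (c :: rest)) v = true := by
        simp only [PySem.Str.endswith_eq]
        rw [PySem.Chars.endswith_iff]
        simpa using hsuf.trans (List.suffix_cons c rest)
      have h2 : PySem.Str.endswith (String.ofList rest) v = true := by
        simp only [PySem.Str.endswith_eq]
        rw [PySem.Chars.endswith_iff]
        simpa using hsuf
      rw [h1, h2]
    · have h2 : PySem.Str.endswith (String.ofList rest) v = false := by
        simp only [PySem.Str.endswith_eq]
        rw [Bool.eq_false_iff]
        intro h
        exact hsuf (by simpa using (PySem.Chars.endswith_iff _ _).1 h)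
      have h1 : PySem.Str.endswith (String.ofList (c :: rest)) v = false := by
        rw [Bool.eq_false_iff]
        intro h
        have := (PySem.Chars.endswith_iff _ _).1 (by simpa using h)
        rcases List.suffix_cons_iff.1 (by simpa using this) with heq | hs
        · have : v = String.ofList (c :: rest) := by
            simpa using congrArg String.ofList heq
          exact hmem (this ▸ hv)
        · exact hsuf hs
      rw [h1, h2]
  unfold mtStepB
  rw [hends]

theorem foldB_tail (c : Char) (rest : List Char) (values : List String)
    (hmem : String.ofList (c :: rest) ∉ values) :
    List.foldl (mtStepB (String.ofList (c :: rest))) none values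
      = List.foldl (mtStepB (String.ofList rest)) none values :=
  PySem.List.foldl_congr_mem values _ _ none
    (fun acc v hv => stepB_tail c rest values hmem acc v hv)

-- A's shrinking loop equals B's single scan of values.
theorem loop_eq (cs : List Char) (values : List String) :
    mtLoopA values cs =
      (match List.foldl (mtStepB (String.ofList cs)) none values with
       | none => 0
       | some b => ((PySem.List.index? values b).getD 0 : Int)) := by
  induction cs with
  | nil => simp [mtLoopA, foldB_empty]
  | cons c rest ih =>
    by_cases hmem : String.ofList (c :: rest) ∈ values
    · have hS : (String.ofList (c :: rest)).toList = c :: rest := by simp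
      have hne : String.ofList (c :: rest) ≠ "" := by
        intro h
        have := congrArg String.toList h
        simp at this
      rcases foldB_dom (String.ofList (c :: rest)) values none _ hmem hne (by rw [hS]) with
        ⟨b, hb, hlen⟩
      rcases foldB_shape (String.ofList (c :: rest)) values none with h | ⟨v, _, hr, _, hsuf⟩
      · rw [h] at hb; cases hb
      · rw [hr] at hb
        have hvb : v = b := by injection hb
        subst hvb
        have hlist : v.toList = c :: rest := by
          refine List.IsSuffix.eq_of_length_le (by simpa [hS] using hsuf) ?_
          simpa [hS] using hlen
        have hvS : v = String.ofList (c :: rest) := by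
          simpa using congrArg String.ofList hlist
        subst hvS
        rw [hr]
        simp [mtLoopA, hmem]
    · rw [foldB_tail c rest values hmem]
      rw [← ih]
      simp [mtLoopA, hmem]

-- ===== VERDICT (by name: the statement is the Claim_ definition above) =====
theorem makeTransition_spec : Claim_equal_makeTransition := by
  intro strcmp values key j transitionStates _
  unfold Spec_makeTransition makeTransition makeTransition_alt
  have := loop_eq (if PySem.Str.slice strcmp none (some 3) == "eps" then
      PySem.Str.slice strcmp (some 3) none else strcmp).toList values
  simpa using this
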